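-- pv_equiv track=rewrite | github.com/wangyuanhao/DeFusion | dataModule.py | rename_stage
-- ===== SOURCE A (Python) =====
-- def rename_stage(stage):
--     # combine stage xxa, xxb, and xxc
--     # Input:
--     #   stage: list of stage
--     # Output:
--     #   re_stage: list of combine stage
--     re_stage = []
--     for item in stage:
--         if item in ['stage i', 'stage ia', 'stage ib', 'stage ic']:
--             re_stage.append('stage i')
--         elif item in ['stage ii', 'stage iia', 'stage iib', 'stage iic']:
--             re_stage.append('stage ii')
--         elif item in ['stage iii', 'stage iiia', 'stage iiib', 'stage iiic']:
--             re_stage.append('stage iii')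
--         elif item in ['stage iv', 'stage iva', 'stage ivb', 'stage ivc']:
--             re_stage.append('stage iv')
--         elif item in ['stage x', 'stage xa', 'stage xb', 'stage xc']:
--             re_stage.append('stage x')
--         else:
--             re_stage.append('uknwn')
--
--     return re_stage
-- ===== SOURCE B (Python) =====
-- def rename_stage(stage):
--     # Parse each item instead of testing 20 literals: take the part after
--     # 'stage ', drop one trailing a/b/c sub-stage letter, validate the base.
--     def canon(item):
--         if isinstance(item, str) and item.startswith('stage '):
--             rest = item[6:]
--             if rest[-1:] in ('a', 'b', 'c'):
--                 rest = rest[:-1]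
--             if rest in ('i', 'ii', 'iii', 'iv', 'x'):
--                 return 'stage ' + rest
--         return 'uknwn'
--     return [canon(item) for item in stage]
-- ===== Notes on version B (the rewrite author's own statement) =====
-- stated objective: simpler
-- what changed: B parses each item (split off the 'stage ' prefix, drop one trailing a/b/c sub-stage letter, validate the base against {i,ii,iii,iv,x}) instead of testing each item against five 4-element literal lists.
import Mathlib
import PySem

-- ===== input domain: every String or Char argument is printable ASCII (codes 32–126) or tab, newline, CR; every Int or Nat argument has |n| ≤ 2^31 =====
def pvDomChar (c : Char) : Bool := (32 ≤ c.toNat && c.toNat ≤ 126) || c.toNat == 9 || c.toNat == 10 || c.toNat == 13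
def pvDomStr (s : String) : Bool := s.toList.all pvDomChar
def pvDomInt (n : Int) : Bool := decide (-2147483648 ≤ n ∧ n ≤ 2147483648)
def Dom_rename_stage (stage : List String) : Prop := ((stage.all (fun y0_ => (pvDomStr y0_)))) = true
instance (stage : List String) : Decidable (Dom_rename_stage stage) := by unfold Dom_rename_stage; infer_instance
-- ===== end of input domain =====

-- B parses each item ('stage ' prefix + base + optional a/b/c sub-stage letter) instead of
-- testing against five 4-element literal lists; objective: simpler (no speed claim).

-- ===== PORT A =====
def rename_stage (stage : List String) : List String :=
  stage.foldl (fun re_stage item =>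
    if item ∈ ["stage i", "stage ia", "stage ib", "stage ic"] then re_stage ++ ["stage i"]
    else if item ∈ ["stage ii", "stage iia", "stage iib", "stage iic"] then re_stage ++ ["stage ii"]
    else if item ∈ ["stage iii", "stage iiia", "stage iiib", "stage iiic"] then re_stage ++ ["stage iii"]
    else if item ∈ ["stage iv", "stage iva", "stage ivb", "stage ivc"] then re_stage ++ ["stage iv"]
    else if item ∈ ["stage x", "stage xa", "stage xb", "stage xc"] then re_stage ++ ["stage x"]
    else re_stage ++ ["uknwn"]) []

-- ===== PORT B =====
-- rest[-1:] in ('a','b','c') is a last-character test (exact: a one-char slice from the end),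
-- rest[:-1] is dropLast (exact), so the in-place reassignment of `rest` becomes this helper.
def stripSub (r : List Char) : List Char :=
  if r.getLast? = some 'a' ∨ r.getLast? = some 'b' ∨ r.getLast? = some 'c' then r.dropLast else r

-- item.startswith('stage ') via PySem.Chars.startswith; item[6:] is drop 6 (exact: nonnegative index).
def canon_stage (item : String) : String :=
  if PySem.Chars.startswith item.toList "stage ".toList then
    if stripSub (item.toList.drop 6) = "i".toList ∨ stripSub (item.toList.drop 6) = "ii".toList ∨
       stripSub (item.toList.drop 6) = "iii".toList ∨ stripSub (item.toList.drop 6) = "iv".toList ∨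
       stripSub (item.toList.drop 6) = "x".toList then
      String.ofList ("stage ".toList ++ stripSub (item.toList.drop 6))
    else "uknwn"
  else "uknwn"

def rename_stage_alt (stage : List String) : List String := stage.map canon_stage

-- ===== PRECONDITION & SPEC =====
def Spec_rename_stage (stage : List String) (out : List String) : Prop := out = rename_stage_alt stage
instance (stage : List String) (out : List String) : Decidable (Spec_rename_stage stage out) := by unfold Spec_rename_stage; infer_instance

-- ===== CLAIM (what is proved, stated in full; the proofs are below) =====
def Claim_equal_rename_stage : Prop := ∀ (stage : List String), Dom_rename_stage stage → Spec_rename_stage stage (rename_stage stage)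

-- ===== LEMMAS AND PROOFS =====

-- A's per-item if-chain, abstracted out of its loop body (proof helper only).
def chainA (item : String) : String :=
  if item ∈ ["stage i", "stage ia", "stage ib", "stage ic"] then "stage i"
  else if item ∈ ["stage ii", "stage iia", "stage iib", "stage iic"] then "stage ii"
  else if item ∈ ["stage iii", "stage iiia", "stage iiib", "stage iiic"] then "stage iii"
  else if item ∈ ["stage iv", "stage iva", "stage ivb", "stage ivc"] then "stage iv"
  else if item ∈ ["stage x", "stage xa", "stage xb", "stage xc"] then "stage x"
  else "uknwn"

lemma renameA_eq_map (stage : List String) : rename_stage stage = stage.map chainA := by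
  have h : rename_stage stage = stage.foldl (fun re item => re ++ [chainA item]) [] := by
    unfold rename_stage
    congr 1
    funext re item
    unfold chainA
    split_ifs <;> rfl
  rw [h, PySem.List.foldl_append_singleton_eq_map]
  rfl

-- If the stripped remainder is a valid base, the raw remainder is one of the 20 tails.
lemma key (r : List Char)
    (h : stripSub r = "i".toList ∨ stripSub r = "ii".toList ∨ stripSub r = "iii".toList ∨
         stripSub r = "iv".toList ∨ stripSub r = "x".toList) :
    r = "i".toList ∨ r = "ia".toList ∨ r = "ib".toList ∨ r = "ic".toList ∨
    r = "ii".toList ∨ r = "iia".toList ∨ r = "iib".toList ∨ r = "iic".toList ∨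
    r = "iii".toList ∨ r = "iiia".toList ∨ r = "iiib".toList ∨ r = "iiic".toList ∨
    r = "iv".toList ∨ r = "iva".toList ∨ r = "ivb".toList ∨ r = "ivc".toList ∨
    r = "x".toList ∨ r = "xa".toList ∨ r = "xb".toList ∨ r = "xc".toList := by
  unfold stripSub at h
  split_ifs at h with hl
  · rcases hl with hl|hl|hl <;> rcases h with h|h|h|h|h <;>
      (rw [← List.dropLast_append_getLast? _ hl, h]; decide)
  · rcases h with h|h|h|h|h <;> (subst h; decide)

lemma chainA_eq_canon (item : String) : chainA item = canon_stage item := by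
  by_cases h1 : item ∈ ["stage i", "stage ia", "stage ib", "stage ic"]
  · fin_cases h1 <;> decide
  by_cases h2 : item ∈ ["stage ii", "stage iia", "stage iib", "stage iic"]
  · fin_cases h2 <;> decide
  by_cases h3 : item ∈ ["stage iii", "stage iiia", "stage iiib", "stage iiic"]
  · fin_cases h3 <;> decide
  by_cases h4 : item ∈ ["stage iv", "stage iva", "stage ivb", "stage ivc"]
  · fin_cases h4 <;> decide
  by_cases h5 : item ∈ ["stage x", "stage xa", "stage xb", "stage xc"]
  · fin_cases h5 <;> decide
  unfold chainA
  rw [if_neg h1, if_neg h2, if_neg h3, if_neg h4, if_neg h5]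
  unfold canon_stage
  split_ifs with hpre hbase
  · -- startswith and valid base: item must be one of the 20 literals, contradiction
    exfalso
    have hcs : item.toList = "stage ".toList ++ item.toList.drop 6 := by
      simp [PySem.Chars.startswith, List.isPrefixOf_iff_prefix] at hpre
      obtain ⟨t, ht⟩ := hpre
      rw [← ht]
      simp
    have hit : item = String.ofList ("stage ".toList ++ item.toList.drop 6) := by
      have h := congrArg String.ofList hcs
      rwa [String.ofList_toList] at h
    rcases key (item.toList.drop 6) hbase
      with hr|hr|hr|hr|hr|hr|hr|hr|hr|hr|hr|hr|hr|hr|hr|hr|hr|hr|hr|hr <;>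
      (rw [hr] at hit; subst hit;
       first
       | exact h1 (by decide)
       | exact h2 (by decide)
       | exact h3 (by decide)
       | exact h4 (by decide)
       | exact h5 (by decide))
  · rfl
  · rfl

-- ===== VERDICT (by name: the statement is the Claim_ definition above) =====
theorem rename_stage_spec : Claim_equal_rename_stage := by
  intro stage _
  unfold Spec_rename_stage rename_stage_alt
  rw [renameA_eq_map]
  exact List.map_congr_left fun item _ => chainA_eq_canon item
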